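-- pv_equiv track=rewrite | github.com/larahoffman/algo1 | Python/parcial2023.py | acomodar
-- ===== SOURCE A (Python) =====
-- def acomodar(s:list[str]) -> list[str]:
--     lista_UP:list[str] = []
--     lista_LLA:list[str] = []
--
--     for elemento in s:
--         if elemento == "UP":
--             lista_UP.append(elemento)
--         elif elemento == "LLA":
--             lista_LLA.append(elemento)
--
--     resultado:list[str] = []
--     resultado += lista_UP
--     resultado += lista_LLA
--     return resultado
-- ===== SOURCE B (Python) =====
-- def acomodar(s: list[str]) -> list[str]:
--     return ["UP"] * s.count("UP") + ["LLA"] * s.count("LLA")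
-- ===== Notes on version B (the rewrite author's own statement) =====
-- stated objective: simpler
-- what changed: B counts the two tokens with list.count and builds the result by list multiplication, instead of A's loop that appends matched elements to two accumulator lists and concatenates them.
import Mathlib
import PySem

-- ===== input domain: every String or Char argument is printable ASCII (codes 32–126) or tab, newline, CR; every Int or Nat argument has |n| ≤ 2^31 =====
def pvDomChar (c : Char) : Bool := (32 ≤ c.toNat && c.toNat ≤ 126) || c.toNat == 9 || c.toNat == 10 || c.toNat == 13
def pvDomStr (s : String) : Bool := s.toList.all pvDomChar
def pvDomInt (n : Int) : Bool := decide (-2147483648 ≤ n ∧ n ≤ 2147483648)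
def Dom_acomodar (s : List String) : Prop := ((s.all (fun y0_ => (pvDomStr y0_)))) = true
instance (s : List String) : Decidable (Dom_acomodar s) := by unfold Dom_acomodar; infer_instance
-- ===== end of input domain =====

-- B counts the two tokens and builds the result by replication instead of A's two accumulator lists; objective: simpler.

-- ===== PORT A =====
def acomodar (s : List String) : List String :=
  let acc := s.foldl (fun (p : List String × List String) elemento =>
      if elemento = "UP" then (p.1 ++ [elemento], p.2)
      else if elemento = "LLA" then (p.1, p.2 ++ [elemento])
      else p) ([], [])
  let resultado : List String := []
  let resultado := resultado ++ acc.1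
  let resultado := resultado ++ acc.2
  resultado

-- ===== PORT B =====
def acomodar_alt (s : List String) : List String :=
  List.replicate (PySem.List.count s "UP") "UP" ++ List.replicate (PySem.List.count s "LLA") "LLA"

-- ===== PRECONDITION & SPEC =====
def Spec_acomodar (s : List String) (out : List String) : Prop := out = acomodar_alt s
instance (s : List String) (out : List String) : Decidable (Spec_acomodar s out) := by unfold Spec_acomodar; infer_instance

-- ===== CLAIM (what is proved, stated in full; the proofs are below) =====
def Claim_equal_acomodar : Prop := ∀ (s : List String), Dom_acomodar s → Spec_acomodar s (acomodar s)

-- ===== LEMMAS AND PROOFS =====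

theorem acomodar_loop_inv (s : List String) (u l : List String) :
    s.foldl (fun (p : List String × List String) elemento =>
      if elemento = "UP" then (p.1 ++ [elemento], p.2)
      else if elemento = "LLA" then (p.1, p.2 ++ [elemento])
      else p) (u, l)
    = (u ++ List.replicate (s.count "UP") "UP", l ++ List.replicate (s.count "LLA") "LLA") := by
  induction s generalizing u l with
  | nil => simp
  | cons x xs ih =>
    simp only [List.foldl_cons]
    by_cases hu : x = "UP"
    · subst hu
      simp [ih, List.replicate_succ', List.append_assoc, ← List.replicate_succ]
    · by_cases hl : x = "LLA"
      · subst hl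
        simp [ih, List.replicate_succ', List.append_assoc, ← List.replicate_succ]
      · simp [hu, hl, ih]

-- ===== VERDICT (by name: the statement is the Claim_ definition above) =====
theorem acomodar_spec : Claim_equal_acomodar := by
  intro s _
  unfold Spec_acomodar acomodar acomodar_alt
  simp [acomodar_loop_inv, PySem.List.count]
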